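-- pv_equiv track=rewrite | github.com/JustDoYoung/Coding-Test | 프로그래머스/1/140108. 문자열 나누기/문자열 나누기.py | solution
-- ===== SOURCE A (Python) =====
-- def solution(s):
--     answer = 0
--
--     alpha_1 = s[0]
--     count_1, count_2 = 0, 0
--
--     for i, c in enumerate(s):
--         if alpha_1 == "":
--             alpha_1 = c
--
--         if alpha_1 == c:
--             count_1 += 1
--         else:
--             count_2 += 1
--
--         if count_1 == count_2:
--             alpha_1 = ""
--             count_1, count_2 = 0, 0
--             answer += 1
--     else:
--         if count_1 != count_2:
--             answer += 1
--
--     return answer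
-- ===== SOURCE B (Python) =====
-- def solution(s):
--     answer = 0
--     t = s
--     while t:
--         ref = t[0]
--         k = len(t)
--         for j in range(1, len(t) + 1):
--             if 2 * t[:j].count(ref) == j:
--                 k = j
--                 break
--         t = t[k:]
--         answer += 1
--     return answer
-- ===== Notes on version B (the rewrite author's own statement) =====
-- stated objective: alternative
-- what changed: A keeps running match/mismatch counters updated per character with a sentinel reset; B keeps no counters at all: per segment it finds the split point as the first prefix length j with 2*prefix.count(ref)==j using slicing and str.count, then drops that prefix and repeats.
import Mathlib
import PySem

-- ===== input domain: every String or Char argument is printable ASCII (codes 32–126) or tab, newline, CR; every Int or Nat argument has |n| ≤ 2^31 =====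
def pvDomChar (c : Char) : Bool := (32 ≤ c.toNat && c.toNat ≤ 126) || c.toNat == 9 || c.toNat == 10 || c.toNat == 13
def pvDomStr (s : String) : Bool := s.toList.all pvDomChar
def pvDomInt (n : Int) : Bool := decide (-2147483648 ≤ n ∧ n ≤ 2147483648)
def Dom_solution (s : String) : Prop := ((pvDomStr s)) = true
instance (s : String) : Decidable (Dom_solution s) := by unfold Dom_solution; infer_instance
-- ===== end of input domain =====

-- B replaces A's running match/mismatch counters by a segment loop that finds each split
-- point via prefix character counts (2*count(prefix)==len); return values proved equal on
-- nonempty strings (A raises IndexError on "", excluded by Pre_).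


-- ===== PORT A =====
-- A's for-loop; alpha_1's "" sentinel is modelled as `none : Option Char` (exact: alpha_1 is either "" or a 1-char string)
def solutionLoop : List Char → Option Char → Int → Int → Int → Int
  | [], _, c1, c2, ans => if c1 ≠ c2 then ans + 1 else ans
  | c :: rest, a, c1, c2, ans =>
    let a := match a with | none => some c | some x => some x
    if a = some c then
      if c1 + 1 = c2 then solutionLoop rest none 0 0 (ans + 1)
      else solutionLoop rest a (c1 + 1) c2 ans
    else
      if c1 = c2 + 1 then solutionLoop rest none 0 0 (ans + 1)
      else solutionLoop rest a c1 (c2 + 1) ans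

def solution (s : String) : Int :=
  match s.toList with
  | [] => 0  -- unreachable: Python A raises IndexError on "" (excluded by Pre_solution)
  | c0 :: _ => solutionLoop s.toList (some c0) 0 0 0

-- ===== PORT B =====
-- B's inner `for j in range(1, len(t)+1)` with break, ported as structural recursion
-- over the index list List.range' 1 n (= range(1, n+1)): first prefix length j with
-- 2 * t[:j].count(ref) == j (t[:j] -> take j, exact for 0 <= j <= len; str.count of a
-- single char -> List.count, exact); none = the for-loop finished without break.
def findLoop (t : List Char) (ref : Char) : List Nat → Option Nat
  | [] => none
  | j :: js =>
    if 2 * ((t.take j).count ref) = j then some j else findLoop t ref js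

-- needed by solBLoop's termination: a found break index was one of the candidates
theorem findLoop_mem : ∀ (js : List Nat) (t : List Char) (ref : Char) (k : Nat),
    findLoop t ref js = some k → k ∈ js := by
  intro js
  induction js with
  | nil => intro t ref k h; simp [findLoop] at h
  | cons j js ih =>
    intro t ref k h
    rw [findLoop] at h
    by_cases hc : 2 * ((t.take j).count ref) = j
    · simp [hc] at h; simp [h]
    · simp only [hc, if_false] at h
      exact List.mem_cons_of_mem _ (ih t ref k h)

-- B's outer `while t:` loop carrying the answer accumulator
def solBLoop : List Char → Int → Int
  | [], ans => ans
  | c :: rest, ans =>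
    solBLoop ((c :: rest).drop
      ((findLoop (c :: rest) c (List.range' 1 (c :: rest).length)).getD (c :: rest).length))
      (ans + 1)
  termination_by t _ => t.length
  decreasing_by
    cases hf : findLoop (c :: rest) c (List.range' 1 (c :: rest).length) with
    | none => simp
    | some k =>
      have h1 : 1 ≤ k := (List.mem_range'_1.mp (findLoop_mem _ _ _ _ hf)).1
      simp only [Option.getD_some, List.length_drop, List.length_cons]
      omega

def solution_alt (s : String) : Int := solBLoop s.toList 0

-- ===== PRECONDITION & SPEC =====
-- Pre_ excludes only the empty string, on which Python A raises IndexError at s[0].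
def Pre_solution (s : String) : Prop := s ≠ ""
instance (s : String) : Decidable (Pre_solution s) := by unfold Pre_solution; infer_instance
def pvWitness_solution : String := "aabbac"

def Spec_solution (s : String) (out : Int) : Prop := out = solution_alt s
instance (s : String) (out : Int) : Decidable (Spec_solution s out) := by unfold Spec_solution; infer_instance

-- ===== CLAIM (what is proved, stated in full; the proofs are below) =====
def Claim_equal_solution : Prop := ∀ (s : String), Dom_solution s → Pre_solution s → Spec_solution s (solution s)

-- ===== LEMMAS AND PROOFS =====

-- Segment lemma: A mid-segment, having consumed prefix p of the current segment
-- (so its counters are p.count ref and |p| - p.count ref), equals B's prefix-count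
-- search starting at length |p| + 1 over the whole segment p ++ xs.

theorem takePC (p : List Char) (c : Char) (t : List Char) :
    (p ++ c :: t).take (p.length + 1) = p ++ [c] := by
  induction p with
  | nil => simp
  | cons x xs ih => simp [ih]

theorem dropPC (p : List Char) (c : Char) (t : List Char) :
    (p ++ c :: t).drop (p.length + 1) = t := by
  induction p with
  | nil => simp
  | cons x xs ih => simp [ih]

theorem seg : ∀ (xs p : List Char) (ref : Char) (ans c1 c2 : Int),
    c1 = p.count ref → c2 = (p.length : Int) - p.count ref →
    (xs = [] → 2 * p.count ref ≠ p.length) →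
    solutionLoop xs (some ref) c1 c2 ans
      = match findLoop (p ++ xs) ref (List.range' (p.length + 1) xs.length) with
        | some k => solutionLoop ((p ++ xs).drop k) none 0 0 (ans + 1)
        | none => ans + 1 := by
  intro xs
  induction xs with
  | nil =>
    intro p ref ans c1 c2 h1 h2 h0
    have hne : c1 ≠ c2 := by have := h0 rfl; omega
    simp [findLoop, solutionLoop, hne]
  | cons c t ih =>
    intro p ref ans c1 c2 h1 h2 h0
    have hlen2 : (p ++ [c]).length = p.length + 1 := by
      simp only [List.length_append, List.length_cons, List.length_nil]
    have hcnt : (p ++ [c]).count ref = p.count ref + (if c = ref then 1 else 0) := by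
      simp [List.count_append, List.count_cons]
    rw [List.length_cons, List.range'_succ, findLoop, takePC]
    by_cases hc : ref = c
    · -- A's match branch
      have ha : some ref = some c := by rw [hc]
      have hcnt2 : (p ++ [c]).count ref = p.count ref + 1 := by
        rw [hcnt, if_pos hc.symm]
      by_cases hcond : 2 * ((p ++ [c]).count ref) = p.length + 1
      · -- counts balance: A breaks, B's search hits
        have hbreak : c1 + 1 = c2 := by omega
        simp only [solutionLoop, if_pos ha, if_pos hbreak, if_pos hcond, dropPC]
      · have hbreak : ¬ (c1 + 1 = c2) := by omega
        simp only [solutionLoop, if_pos ha, if_neg hbreak, if_neg hcond]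
        have := ih (p ++ [c]) ref ans (c1 + 1) c2
          (by rw [hcnt2]; push_cast; omega)
          (by rw [hcnt2, hlen2]; push_cast; omega)
          (fun _ => by rw [hlen2]; omega)
        rw [this, hlen2]
        simp [List.append_assoc]
    · -- A's mismatch branch
      have ha : ¬ (some ref = some c) := by simp [hc]
      have hcnt' : (p ++ [c]).count ref = p.count ref := by
        rw [hcnt, if_neg (fun h => hc h.symm)]; omega
      by_cases hcond : 2 * ((p ++ [c]).count ref) = p.length + 1
      · have hbreak : c1 = c2 + 1 := by omega
        simp only [solutionLoop, if_neg ha, if_pos hbreak, if_pos hcond, dropPC]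
      · have hbreak : ¬ (c1 = c2 + 1) := by omega
        simp only [solutionLoop, if_neg ha, if_neg hbreak, if_neg hcond]
        have := ih (p ++ [c]) ref ans c1 (c2 + 1)
          (by rw [hcnt']; omega)
          (by rw [hcnt', hlen2]; push_cast; omega)
          (fun _ => by rw [hlen2]; omega)
        rw [this, hlen2]
        simp [List.append_assoc]

theorem none_eq : ∀ (n : Nat) (s : List Char), s.length ≤ n → ∀ (ans : Int),
    solutionLoop s none 0 0 ans = solBLoop s ans := by
  intro n
  induction n with
  | zero =>
    intro s hs ans
    have : s = [] := List.length_eq_zero_iff.mp (Nat.le_zero.mp hs)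
    subst this
    simp [solutionLoop, solBLoop]
  | succ n ih =>
    intro s hs ans
    cases s with
    | nil => simp [solutionLoop, solBLoop]
    | cons c t =>
      -- A consumes c: sentinel becomes c, counters (1, 0)
      have hstep : solutionLoop (c :: t) none 0 0 ans
          = solutionLoop t (some c) 1 0 ans := by
        simp [solutionLoop]
      -- B's search skips j = 1 (2 * 1 ≠ 1)
      have hfind : findLoop (c :: t) c (List.range' 1 (c :: t).length)
          = findLoop (c :: t) c (List.range' 2 t.length) := by
        rw [List.length_cons, List.range'_succ, findLoop]
        simp
      have hseg := seg t [c] c ans 1 0 (by simp) (by simp) (fun _ => by simp)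
      simp only [List.length_cons, List.length_nil, List.singleton_append] at hseg
      rw [hstep, hseg]
      cases hf : findLoop (c :: t) c (List.range' 2 t.length) with
      | some k =>
        have hk : 2 ≤ k := (List.mem_range'_1.mp (findLoop_mem _ _ _ _ hf)).1
        rw [solBLoop, hfind, hf]
        simp only [Option.getD_some]
        exact ih _ (by simp only [List.length_drop, List.length_cons] at hs ⊢; omega) (ans + 1)
      | none =>
        rw [solBLoop, hfind, hf]
        simp only [Option.getD_none, List.drop_length, solBLoop]

-- ===== VERDICT (by name: the statement is the Claim_ definition above) =====
theorem solution_spec : Claim_equal_solution := by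
  intro s _ hpre
  unfold Spec_solution solution solution_alt
  have hne : s.toList ≠ [] := fun h => hpre (String.toList_eq_nil_iff.mp h)
  cases hl : s.toList with
  | nil => exact absurd hl hne
  | cons c0 rest =>
    show solutionLoop (c0 :: rest) (some c0) 0 0 0 = solBLoop (c0 :: rest) 0
    have h1 : solutionLoop (c0 :: rest) (some c0) 0 0 0
        = solutionLoop (c0 :: rest) none 0 0 0 := by
      simp [solutionLoop]
    rw [h1, none_eq (c0 :: rest).length _ (le_refl _)]
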